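-- pv_equiv track=rewrite | github.com/need-singularity/sylvian-singularity | calc/hph9_cosmo_quantum_verification.py | divisor_functions
-- ===== SOURCE A (Python) =====
-- import math
--
-- def divisor_functions(m):
--     """Compute sigma, tau, phi for integer m."""
--     if m <= 0:
--         return 0, 0, 0
--     divs = [d for d in range(1, m + 1) if m % d == 0]
--     sig = sum(divs)
--     ta = len(divs)
--     # Euler totient
--     ph = sum(1 for k in range(1, m + 1) if math.gcd(k, m) == 1)
--     return sig, ta, ph
-- ===== SOURCE B (Python) =====
-- def divisor_functions(m):
--     """Compute sigma, tau, phi for integer m."""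
--     if m <= 0:
--         return 0, 0, 0
--     n = m
--     sig = 1
--     ta = 1
--     ph = 1
--     d = 2
--     while d * d <= n:
--         if n % d == 0:
--             e = 0
--             while n % d == 0:
--                 n //= d
--                 e += 1
--             sig *= (d ** (e + 1) - 1) // (d - 1)
--             ta *= e + 1
--             ph *= d ** (e - 1) * (d - 1)
--         d += 1
--     if n > 1:
--         sig *= n + 1
--         ta *= 2
--         ph *= n - 1
--     return sig, ta, ph
-- ===== Notes on version B (the rewrite author's own statement) =====
-- stated objective: faster
-- what changed: Replaced the O(m) divisor scan and the O(m log m) gcd-counting loop by trial-division factorization up to sqrt(m) with the multiplicative closed forms for sigma, tau and phi.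
import Mathlib
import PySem

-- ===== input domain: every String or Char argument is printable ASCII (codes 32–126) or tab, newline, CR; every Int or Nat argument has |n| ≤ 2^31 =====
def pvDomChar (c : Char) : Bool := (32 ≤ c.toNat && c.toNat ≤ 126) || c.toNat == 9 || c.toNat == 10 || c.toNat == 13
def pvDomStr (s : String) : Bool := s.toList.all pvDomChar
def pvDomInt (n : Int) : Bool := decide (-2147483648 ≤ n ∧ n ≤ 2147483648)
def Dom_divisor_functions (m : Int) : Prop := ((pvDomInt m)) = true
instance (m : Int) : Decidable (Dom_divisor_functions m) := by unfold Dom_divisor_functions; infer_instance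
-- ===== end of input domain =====

-- B replaces A's O(m) divisor scan and O(m log m) gcd count by trial-division
-- factorization to √m with the multiplicative closed forms (objective: faster).
-- Python returns a 3-tuple (sig, tau, phi); per the task signature it is ported as a 3-element list.

-- ===== PORT A =====
-- literal transliteration: list of divisors by scanning 1..m, its sum and length,
-- then a gcd-count for the totient.  m ≥ 1 and d ≥ 1 in every loop, so Python's
-- `%` agrees with PySem.Int.mod and math.gcd with Int.gcd (both arguments nonnegative).
def divisor_functions (m : Int) : List Int :=
  if m ≤ 0 then [0, 0, 0]
  else
    let divs := (PySem.List.pyRange 1 (m + 1) 1).filter (fun d => PySem.Int.mod m d == 0)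
    let sig := divs.sum
    let ta : Int := divs.length
    let ph : Int := ((PySem.List.pyRange 1 (m + 1) 1).filter (fun k => Int.gcd k m == 1)).length
    [sig, ta, ph]

-- ===== PORT B =====
-- inner `while n % d == 0` loop of Source B: strips all factors d, returning (e, n').
-- The guard `2 ≤ d ∧ 1 ≤ n` only makes the recursion total; it always holds when called.
def pvStrip (n d : ℕ) : ℕ × ℕ :=
  if h : 2 ≤ d ∧ 1 ≤ n ∧ n % d = 0 then
    let p := pvStrip (n / d) d
    (p.1 + 1, p.2)
  else (0, n)
termination_by n
decreasing_by exact Nat.div_lt_self h.2.1 (by omega)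

lemma pvStrip_snd_le (n d : ℕ) : (pvStrip n d).2 ≤ n := by
  induction n using Nat.strong_induction_on with
  | _ n ih =>
    rw [pvStrip]
    split
    · rename_i h
      exact le_trans (ih (n / d) (Nat.div_lt_self h.2.1 (by omega))) (Nat.div_le_self n d)
    · exact le_rfl

-- outer `while d * d <= n` loop of Source B, carrying the three accumulators;
-- the trailing `if n > 1` of Source B is the else-branch.
def pvLoop (n d sig ta ph : ℕ) : ℕ × ℕ × ℕ :=
  if h : d * d ≤ n then
    if hd : n % d = 0 then
      let p := pvStrip n d
      pvLoop p.2 (d + 1) (sig * ((d ^ (p.1 + 1) - 1) / (d - 1))) (ta * (p.1 + 1))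
        (ph * (d ^ (p.1 - 1) * (d - 1)))
    else pvLoop n (d + 1) sig ta ph
  else if 1 < n then (sig * (n + 1), ta * 2, ph * (n - 1)) else (sig, ta, ph)
termination_by n + 2 - d
decreasing_by
  · have h1 := pvStrip_snd_le n d
    have h2 : d ≤ n + 1 := by
      rcases Nat.eq_zero_or_pos d with h0 | h0
      · omega
      · exact le_trans (le_trans (Nat.le_mul_of_pos_left d h0) h) (Nat.le_succ n)
    omega
  · have h2 : d ≤ n + 1 := by
      rcases Nat.eq_zero_or_pos d with h0 | h0
      · omega
      · exact le_trans (le_trans (Nat.le_mul_of_pos_left d h0) h) (Nat.le_succ n)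
    omega

def divisor_functions_alt (m : Int) : List Int :=
  if m ≤ 0 then [0, 0, 0]
  else
    let r := pvLoop m.toNat 2 1 1 1
    [(r.1 : Int), (r.2.1 : Int), (r.2.2 : Int)]

-- ===== PRECONDITION & SPEC =====
def Spec_divisor_functions (m : Int) (out : List Int) : Prop := out = divisor_functions_alt m
instance (m : Int) (out : List Int) : Decidable (Spec_divisor_functions m out) := by unfold Spec_divisor_functions; infer_instance

-- ===== CLAIM (what is proved, stated in full; the proofs are below) =====
def Claim_equal_divisor_functions : Prop := ∀ (m : Int), Dom_divisor_functions m → Spec_divisor_functions m (divisor_functions m)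

-- ===== LEMMAS AND PROOFS =====

-- pvStrip really computes the d-adic valuation: n = d^e * n' with d ∤ n'.
lemma pvStrip_spec (n d : ℕ) (hd : 2 ≤ d) (hn : 1 ≤ n) :
    n = d ^ (pvStrip n d).1 * (pvStrip n d).2 ∧ ¬ d ∣ (pvStrip n d).2 := by
  induction n using Nat.strong_induction_on with
  | _ n ih =>
    rw [pvStrip]
    split
    · rename_i h
      have hdvd : d ∣ n := (Nat.dvd_iff_mod_eq_zero.mpr h.2.2)
      have hlt : n / d < n := Nat.div_lt_self h.2.1 (by omega)
      have hpos : 1 ≤ n / d := Nat.div_pos (Nat.le_of_dvd (by omega) hdvd) (by omega)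
      obtain ⟨h1, h2⟩ := ih (n / d) hlt hpos
      refine ⟨?_, h2⟩
      calc n = d * (n / d) := (Nat.mul_div_cancel' hdvd).symm
        _ = d * (d ^ (pvStrip (n / d) d).1 * (pvStrip (n / d) d).2) := by rw [← h1]
        _ = d ^ ((pvStrip (n / d) d).1 + 1) * (pvStrip (n / d) d).2 := by ring
    · rename_i h
      refine ⟨by simp, fun hdvd => h ⟨hd, hn, Nat.dvd_iff_mod_eq_zero.mp hdvd⟩⟩

lemma pvStrip_pos (n d : ℕ) (hd : 2 ≤ d) (hn : 1 ≤ n) : 1 ≤ (pvStrip n d).2 := by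
  obtain ⟨h1, _⟩ := pvStrip_spec n d hd hn
  rcases Nat.eq_zero_or_pos (pvStrip n d).2 with h0 | h0
  · rw [h0, Nat.mul_zero] at h1; omega
  · exact h0

lemma pvStrip_fst_pos (n d : ℕ) (hd : 2 ≤ d) (hn : 1 ≤ n) (hdvd : n % d = 0) :
    1 ≤ (pvStrip n d).1 := by
  obtain ⟨h1, h2⟩ := pvStrip_spec n d hd hn
  rcases Nat.eq_zero_or_pos (pvStrip n d).1 with h0 | h0
  · exfalso
    apply h2
    rw [h0, pow_zero, one_mul] at h1
    rw [← h1]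
    exact Nat.dvd_iff_mod_eq_zero.mpr hdvd
  · exact h0

-- Nat geometric series, exactly in Source B's form.
lemma geom_sum_eq_div (p e : ℕ) (hp : 2 ≤ p) :
    (∑ i ∈ Finset.range (e + 1), p ^ i) = (p ^ (e + 1) - 1) / (p - 1) := by
  have key : ∀ e : ℕ, (p - 1) * ∑ i ∈ Finset.range (e + 1), p ^ i = p ^ (e + 1) - 1 := by
    intro e
    induction e with
    | zero => simp
    | succ e ihe =>
      rw [Finset.sum_range_succ, Nat.mul_add, ihe]
      have hpa : p ^ (e + 1 + 1) = p * p ^ (e + 1) := by ring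
      have hge : 1 ≤ p ^ (e + 1) := Nat.one_le_pow _ _ (by omega)
      have hmul : (p - 1) * p ^ (e + 1) = p * p ^ (e + 1) - p ^ (e + 1) := by
        rw [Nat.sub_mul, one_mul]
      have hle : p ^ (e + 1) ≤ p * p ^ (e + 1) := Nat.le_mul_of_pos_left _ (by omega)
      omega
  rw [← key e, Nat.mul_div_cancel_left _ (by omega)]

-- main loop invariant: pvLoop multiplies the accumulators by σ(n), τ(n), φ(n)
lemma pvLoop_eq (n d sig ta ph : ℕ) (hn : 1 ≤ n) (hd : 2 ≤ d)
    (hinv : ∀ p, p.Prime → p ∣ n → d ≤ p) :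
    pvLoop n d sig ta ph =
      (sig * ∑ x ∈ n.divisors, x, ta * n.divisors.card, ph * n.totient) := by
  induction n, d, sig, ta, ph using pvLoop.induct with
  | case1 n d sig ta ph h hdm p ih =>
    rw [pvLoop, dif_pos h, dif_pos hdm]
    have hdvd : d ∣ n := Nat.dvd_iff_mod_eq_zero.mpr hdm
    have hp : d.Prime := by
      have hq := Nat.minFac_prime (show d ≠ 1 by omega)
      have hge : d ≤ d.minFac := hinv d.minFac hq (dvd_trans (Nat.minFac_dvd d) hdvd)
      have hle : d.minFac ≤ d := Nat.minFac_le (by omega)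
      have heq : d.minFac = d := le_antisymm hle hge
      rwa [← heq]
    obtain ⟨hfact, hnd⟩ := pvStrip_spec n d hd hn
    have hn' : 1 ≤ (pvStrip n d).2 := pvStrip_pos n d hd hn
    have he : 1 ≤ (pvStrip n d).1 := pvStrip_fst_pos n d hd hn hdm
    have cop : Nat.Coprime (d ^ (pvStrip n d).1) (pvStrip n d).2 :=
      Nat.Coprime.pow_left _ ((Nat.Prime.coprime_iff_not_dvd hp).mpr hnd)
    have hinv' : ∀ q, q.Prime → q ∣ (pvStrip n d).2 → d + 1 ≤ q := by
      intro q hqp hqd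
      have hqn : q ∣ n := hfact ▸ Dvd.dvd.mul_left hqd (d ^ (pvStrip n d).1)
      have := hinv q hqp hqn
      have hne : q ≠ d := by rintro rfl; exact hnd hqd
      omega
    rw [ih hn' (by omega) hinv']
    have hsum : (∑ x ∈ n.divisors, x)
        = ((d ^ ((pvStrip n d).1 + 1) - 1) / (d - 1)) * ∑ x ∈ (pvStrip n d).2.divisors, x := by
      conv_lhs => rw [hfact]
      rw [Nat.Coprime.sum_divisors_mul cop]
      congr 1
      rw [Nat.sum_divisors_prime_pow hp]
      exact geom_sum_eq_div d _ hp.two_le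
    have hcard : n.divisors.card = ((pvStrip n d).1 + 1) * (pvStrip n d).2.divisors.card := by
      conv_lhs => rw [hfact]
      rw [Nat.Coprime.card_divisors_mul cop]
      congr 1
      rw [Nat.divisors_prime_pow hp, Finset.card_map, Finset.card_range]
    have htot : n.totient = (d ^ ((pvStrip n d).1 - 1) * (d - 1)) * (pvStrip n d).2.totient := by
      conv_lhs => rw [hfact]
      rw [Nat.totient_mul cop, Nat.totient_prime_pow hp (by omega)]
    rw [hsum, hcard, htot]
    refine Prod.ext (by ring) (Prod.ext (by ring) (by ring))
  | case2 n d sig ta ph h hdm ih =>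
    rw [pvLoop, dif_pos h, dif_neg hdm]
    refine ih hn (by omega) ?_
    intro q hqp hqd
    have := hinv q hqp hqd
    have hne : q ≠ d := by
      rintro rfl
      exact hdm (Nat.dvd_iff_mod_eq_zero.mp hqd)
    omega
  | case3 n d sig ta ph h h1 =>
    rw [pvLoop, dif_neg h, if_pos h1]
    have hp : n.Prime := by
      by_contra hnp
      have hq : n.minFac.Prime := Nat.minFac_prime (by omega)
      have hqn : n.minFac ∣ n := Nat.minFac_dvd n
      have hdq : d ≤ n.minFac := hinv _ hq hqn
      obtain ⟨t, ht⟩ := hqn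
      have ht1 : t ≠ 1 := by
        rintro rfl
        rw [mul_one] at ht
        exact hnp (ht ▸ hq)
      have ht0 : t ≠ 0 := by rintro rfl; rw [mul_zero] at ht; omega
      have hr : t.minFac.Prime := Nat.minFac_prime ht1
      have hrn : t.minFac ∣ n := ht ▸ Dvd.dvd.mul_left (Nat.minFac_dvd t) n.minFac
      have hdr : d ≤ t.minFac := hinv _ hr hrn
      have hrle : t.minFac ≤ t := Nat.minFac_le (by omega)
      have hge : d * d ≤ n.minFac * t := Nat.mul_le_mul hdq (le_trans hdr hrle)
      rw [← ht] at hge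
      omega
    have hsum : (∑ x ∈ n.divisors, x) = n + 1 := by
      rw [hp.divisors, Finset.sum_insert (by simp; omega), Finset.sum_singleton]
      omega
    have hcard : n.divisors.card = 2 := by
      rw [hp.divisors, Finset.card_insert_of_notMem (by simp; omega), Finset.card_singleton]
    rw [hsum, hcard, Nat.totient_prime hp]
  | case4 n d sig ta ph h h1 =>
    have hone : n = 1 := by omega
    subst hone
    rw [pvLoop, dif_neg h, if_neg h1]
    simp

-- A-side: list-level filtered sums over range n as Finset sums
lemma list_filter_map_sum (p : ℕ → Bool) (f : ℕ → ℕ) (n : ℕ) :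
    (((List.range n).filter p).map f).sum = ∑ k ∈ (Finset.range n).filter (fun k => p k = true), f k := by
  induction n with
  | zero => simp
  | succ n ihn =>
    rw [List.range_succ, List.filter_append, List.map_append, List.sum_append, ihn,
        Finset.range_add_one, Finset.filter_insert]
    by_cases hp : p n = true
    · rw [if_pos hp, Finset.sum_insert (by simp)]
      simp [hp]
      omega
    · rw [if_neg hp]
      simp [hp]

lemma list_filter_card (p : ℕ → Bool) (n : ℕ) :
    ((List.range n).filter p).length = ((Finset.range n).filter (fun k => p k = true)).card := by
  induction n with
  | zero => simp
  | succ n ihn =>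
    rw [List.range_succ, List.filter_append, List.length_append, ihn,
        Finset.range_add_one, Finset.filter_insert]
    by_cases hp : p n = true
    · rw [if_pos hp, Finset.card_insert_of_notMem (by simp)]
      simp [hp]
    · rw [if_neg hp]
      simp [hp]

lemma divisors_eq_map (n : ℕ) (hn : 1 ≤ n) :
    ((Finset.range n).filter (fun k => (k + 1) ∣ n)).map ⟨Nat.succ, Nat.succ_injective⟩ = n.divisors := by
  ext d
  simp only [Finset.mem_map, Finset.mem_filter, Finset.mem_range, Function.Embedding.coeFn_mk,
    Nat.mem_divisors, Nat.succ_eq_add_one]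
  constructor
  · rintro ⟨k, ⟨hk, hdvd⟩, rfl⟩
    exact ⟨hdvd, by omega⟩
  · rintro ⟨hdvd, hne⟩
    have hd1 : 1 ≤ d := Nat.pos_of_dvd_of_pos hdvd (by omega)
    have hdn : d ≤ n := Nat.le_of_dvd (by omega) hdvd
    exact ⟨d - 1, ⟨by omega, by rwa [Nat.sub_add_cancel hd1]⟩, by omega⟩

lemma count_coprime (n : ℕ) (hn : 1 ≤ n) :
    ((Finset.range n).filter (fun k => Nat.gcd (k + 1) n = 1)).card = n.totient := by
  rcases eq_or_lt_of_le hn with h1 | h2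
  · rw [← h1]
    decide
  · have hmap : ((Finset.range n).filter (fun k => Nat.gcd (k + 1) n = 1)).map
        ⟨Nat.succ, Nat.succ_injective⟩ = (Finset.range n).filter (fun j => Nat.gcd n j = 1) := by
      ext j
      simp only [Finset.mem_map, Finset.mem_filter, Finset.mem_range, Function.Embedding.coeFn_mk,
        Nat.succ_eq_add_one]
      constructor
      · rintro ⟨k, ⟨hk, hg⟩, rfl⟩
        have hne : k + 1 ≠ n := by
          rintro he
          rw [he, Nat.gcd_self] at hg
          omega
        exact ⟨by omega, by rwa [Nat.gcd_comm]⟩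
      · rintro ⟨hj, hg⟩
        have hj1 : 1 ≤ j := by
          rcases Nat.eq_zero_or_pos j with h0 | h0
          · rw [h0, Nat.gcd_zero_right] at hg; omega
          · exact h0
        exact ⟨j - 1, ⟨by omega, by rw [Nat.sub_add_cancel hj1, Nat.gcd_comm]; exact hg⟩, by omega⟩
    calc ((Finset.range n).filter (fun k => Nat.gcd (k + 1) n = 1)).card
        = (((Finset.range n).filter (fun k => Nat.gcd (k + 1) n = 1)).map
            ⟨Nat.succ, Nat.succ_injective⟩).card := (Finset.card_map _).symm
      _ = ((Finset.range n).filter (fun j => Nat.gcd n j = 1)).card := by rw [hmap]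
      _ = n.totient := by rw [Nat.totient]

-- ===== VERDICT (by name: the statement is the Claim_ definition above) =====
lemma pyrange_eq (m : Int) (n : ℕ) (hmn : m = (n : Int)) :
    PySem.List.pyRange 1 (m + 1) 1 = (List.range n).map (fun k : ℕ => (1 : ℤ) + k) := by
  have h : (m + 1 - 1).toNat = n := by omega
  rw [PySem.List.pyRange_one, h]

lemma cast_fun_eq : (fun k : ℕ => (1 : ℤ) + k) = (fun x : ℕ => (x : ℤ)) ∘ (fun k => k + 1) := by
  funext k
  simp only [Function.comp]
  push_cast
  ring

lemma a_sum_eq (n : ℕ) (hn1 : 1 ≤ n) :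
    (((List.range n).filter (fun k => decide ((k + 1) ∣ n))).map (fun k : ℕ => (1 : ℤ) + k)).sum
      = ((∑ x ∈ n.divisors, x : ℕ) : ℤ) := by
  rw [cast_fun_eq, ← List.map_map, ← Nat.cast_list_sum]
  congr 1
  rw [list_filter_map_sum]
  rw [← divisors_eq_map n hn1, Finset.sum_map]
  simp

lemma a_card_eq (n : ℕ) (hn1 : 1 ≤ n) :
    ((List.range n).filter (fun k => decide ((k + 1) ∣ n))).length = n.divisors.card := by
  rw [list_filter_card, ← divisors_eq_map n hn1, Finset.card_map]
  simp

lemma a_phi_eq (n : ℕ) (hn1 : 1 ≤ n) :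
    ((List.range n).filter (fun k => decide (Nat.gcd (k + 1) n = 1))).length = n.totient := by
  rw [list_filter_card, ← count_coprime n hn1]
  simp

-- ===== VERDICT (by name: the statement is the Claim_ definition above) =====
theorem divisor_functions_spec : Claim_equal_divisor_functions := by
  unfold Claim_equal_divisor_functions Spec_divisor_functions
  intro m _
  by_cases hm : m ≤ 0
  · simp [divisor_functions, divisor_functions_alt, hm]
  · have hmn : m = ((m.toNat : ℕ) : Int) := by omega
    set n := m.toNat with hndef
    have hn1 : 1 ≤ n := by omega
    simp only [divisor_functions, divisor_functions_alt, if_neg hm]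
    rw [pvLoop_eq n 2 1 1 1 hn1 le_rfl (fun p hp _ => hp.two_le)]
    rw [pyrange_eq m n hmn]
    rw [List.filter_map, List.filter_map]
    have hpred1 : ∀ k ∈ List.range n,
        ((fun d => PySem.Int.mod m d == 0) ∘ (fun k : ℕ => (1 : ℤ) + k)) k
          = decide ((k + 1) ∣ n) := by
      intro k _
      simp only [Function.comp, hmn]
      rw [show (1 : ℤ) + (k : ℤ) = ((k + 1 : ℕ) : ℤ) by push_cast; ring]
      have h2 : PySem.Int.mod (n : ℤ) ((k + 1 : ℕ) : ℤ) = 0 ↔ (k + 1) ∣ n := by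
        rw [PySem.Int.mod_eq_zero_iff_dvd, Int.natCast_dvd_natCast]
      rw [Bool.eq_iff_iff]
      simp only [beq_iff_eq, decide_eq_true_eq]
      exact h2
    have hpred2 : ∀ k ∈ List.range n,
        ((fun x => Int.gcd x m == 1) ∘ (fun k : ℕ => (1 : ℤ) + k)) k
          = decide (Nat.gcd (k + 1) n = 1) := by
      intro k _
      simp only [Function.comp, hmn]
      rw [show (1 : ℤ) + (k : ℤ) = ((k + 1 : ℕ) : ℤ) by push_cast; ring,
        Int.gcd_natCast_natCast]
      rw [Bool.eq_iff_iff]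
      simp only [beq_iff_eq, decide_eq_true_eq]
    rw [List.filter_congr hpred1, List.filter_congr hpred2]
    rw [a_sum_eq n hn1]
    simp only [List.length_map, one_mul]
    rw [a_card_eq n hn1, a_phi_eq n hn1]
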